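-- pv_equiv track=rewrite | github.com/nikhil-raina/Data-Mining | hw-05/sol.py | data_parser_left
-- ===== SOURCE A (Python) =====
-- def data_parser_left(data, curr_best_feature, threshold):
--     target_data = data[curr_best_feature]
--     features = data.keys()
--     book = {key: [] for key in features}
--     for count in range(len(data["class"])):
--         if target_data[count] <= threshold:
--             for feature in features:
--                 book[feature].append(data[feature][count])
--     return book
-- ===== SOURCE B (Python) =====
-- def data_parser_left(data, curr_best_feature, threshold):
--     target_data = data[curr_best_feature]
--     indices = [i for i in range(len(data["class"])) if target_data[i] <= threshold]
--     return {feature: [column[i] for i in indices] for feature, column in data.items()}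
-- ===== Notes on version B (the rewrite author's own statement) =====
-- stated objective: alternative
-- what changed: Replaces the nested row-then-feature append loop that mutates a dict of accumulators with an index-first pass (compute the passing row indices once) followed by an independent column-major gather per feature.
import Mathlib
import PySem

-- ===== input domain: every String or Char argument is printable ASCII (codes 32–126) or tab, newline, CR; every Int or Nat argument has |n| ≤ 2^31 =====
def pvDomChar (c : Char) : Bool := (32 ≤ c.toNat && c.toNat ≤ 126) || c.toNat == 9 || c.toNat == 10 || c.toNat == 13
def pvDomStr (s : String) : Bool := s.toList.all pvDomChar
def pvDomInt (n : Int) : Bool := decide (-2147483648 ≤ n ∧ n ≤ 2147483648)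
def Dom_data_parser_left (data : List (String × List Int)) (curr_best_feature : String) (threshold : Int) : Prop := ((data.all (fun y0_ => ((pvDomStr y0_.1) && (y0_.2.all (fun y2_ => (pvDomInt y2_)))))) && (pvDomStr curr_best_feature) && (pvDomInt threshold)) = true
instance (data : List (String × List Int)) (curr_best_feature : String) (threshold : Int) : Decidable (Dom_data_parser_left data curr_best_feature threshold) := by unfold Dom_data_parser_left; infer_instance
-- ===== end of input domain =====

-- B replaces A's nested row-then-feature append loop over a dict of accumulators with an
-- index-first pass plus an independent column-major gather per feature (alternative decomposition, same cost).


-- ===== PORT A =====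
def data_parser_left (data : List (String × List Int)) (curr_best_feature : String) (threshold : Int) : List (String × List Int) :=
  let d := PySem.Dict.mk data
  let target_data := d.getD curr_best_feature []
  let features := d.keys
  let book : PySem.Dict String (List Int) :=
    features.foldl (fun b key => b.insert key ([] : List Int)) PySem.Dict.empty
  let book :=
    (PySem.List.pyRange 0 ((d.getD "class" []).length : Int) 1).foldl
      (fun b count =>
        if PySem.List.pyGetD target_data count 0 ≤ threshold then
          features.foldl
            (fun b feature =>
              b.modify feature [] (fun xs => xs ++ [PySem.List.pyGetD (d.getD feature []) count 0]))
            b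
        else b)
      book
  book.items

-- ===== PORT B =====
def data_parser_left_alt (data : List (String × List Int)) (curr_best_feature : String) (threshold : Int) : List (String × List Int) :=
  let d := PySem.Dict.mk data
  let target_data := d.getD curr_best_feature []
  let indices :=
    (PySem.List.pyRange 0 ((d.getD "class" []).length : Int) 1).filter
      (fun i => decide (PySem.List.pyGetD target_data i 0 ≤ threshold))
  d.items.map (fun p => (p.1, indices.map (fun i => PySem.List.pyGetD p.2 i 0)))

-- ===== PRECONDITION & SPEC =====
-- Pre_ = exactly the inputs on which the Python A returns: both keys present, the target column
-- covers every row index, every column covers every PASSING row index (else IndexError/KeyError);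
-- association lists with duplicate keys are excluded because they do not arise from a Python dict.
def Pre_data_parser_left (data : List (String × List Int)) (curr_best_feature : String) (threshold : Int) : Prop :=
  (data.map (·.1)).Nodup ∧
  (PySem.Dict.mk data).contains curr_best_feature = true ∧
  (PySem.Dict.mk data).contains "class" = true ∧
  ((PySem.Dict.mk data).getD "class" []).length ≤ ((PySem.Dict.mk data).getD curr_best_feature []).length ∧
  (∀ i < ((PySem.Dict.mk data).getD "class" []).length,
    ((PySem.Dict.mk data).getD curr_best_feature []).getD i 0 ≤ threshold →
    ∀ p ∈ data, i < p.2.length)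
instance (data : List (String × List Int)) (curr_best_feature : String) (threshold : Int) : Decidable (Pre_data_parser_left data curr_best_feature threshold) := by unfold Pre_data_parser_left; infer_instance

def pvWitness_data_parser_left : (List (String × List Int)) × String × Int :=
  ([("class", [1, 2]), ("f", [3, -1])], "f", 0)

def Spec_data_parser_left (data : List (String × List Int)) (curr_best_feature : String) (threshold : Int) (out : List (String × List Int)) : Prop := out = data_parser_left_alt data curr_best_feature threshold
instance (data : List (String × List Int)) (curr_best_feature : String) (threshold : Int) (out : List (String × List Int)) : Decidable (Spec_data_parser_left data curr_best_feature threshold out) := by unfold Spec_data_parser_left; infer_instance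

-- ===== CLAIM (what is proved, stated in full; the proofs are below) =====
def Claim_equal_data_parser_left : Prop := ∀ (data : List (String × List Int)) (curr_best_feature : String) (threshold : Int), Dom_data_parser_left data curr_best_feature threshold → Pre_data_parser_left data curr_best_feature threshold → Spec_data_parser_left data curr_best_feature threshold (data_parser_left data curr_best_feature threshold)

-- ===== LEMMAS AND PROOFS =====

-- book = {key: [] for key in features}: every lookup with default [] yields []
lemma getD_foldl_insert_nil (l : List String) (b : PySem.Dict String (List Int))
    (h : ∀ k', b.getD k' [] = []) (k' : String) :
    (l.foldl (fun b key => b.insert key ([] : List Int)) b).getD k' [] = [] := by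
  induction l generalizing b with
  | nil => exact h k'
  | cons x xs ih =>
      simp only [List.foldl_cons]
      exact ih _ (fun k'' => by rw [PySem.Dict.getD_insert]; split <;> [rfl; exact h k''])

-- Set.update adds nothing when everything is already present
lemma set_update_of_subset (s xs : List String) (h : ∀ x ∈ xs, x ∈ s) :
    PySem.Set.update s xs = s := by
  induction xs generalizing s with
  | nil => simp [PySem.Set.update_nil]
  | cons x xs ih =>
      rw [PySem.Set.update_cons, PySem.Set.add_of_mem (h x (by simp))]
      exact ih s (fun y hy => h y (by simp [hy]))

-- the inner 'for feature in features: book[feature].append(v feature)' loop, pointwise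
lemma inner_loop_getD (g : String → Int) (ks : List String) (b : PySem.Dict String (List Int))
    (k' : String) (hnd : ks.Nodup) :
    (ks.foldl (fun b k => b.modify k [] (fun xs => xs ++ [g k])) b).getD k' [] =
    (if k' ∈ ks then b.getD k' [] ++ [g k'] else b.getD k' []) := by
  induction ks generalizing b with
  | nil => simp
  | cons x xs ih =>
      simp only [List.foldl_cons]
      rw [ih _ (List.nodup_cons.mp hnd).2]
      by_cases hx : k' = x
      · subst hx
        have hnot : k' ∉ xs := (List.nodup_cons.mp hnd).1
        simp [hnot]
      · by_cases hm : k' ∈ xs <;> simp [hm, hx, PySem.Dict.getD_modify]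

-- the outer row loop: keys are preserved and each key's list collects the passing rows
lemma outer_loop (p : Int → Prop) [DecidablePred p] (val : String → Int → Int)
    (ks : List String) (hnd : ks.Nodup) (cs : List Int) (b : PySem.Dict String (List Int))
    (hk : b.keys = ks) :
    (cs.foldl
        (fun b c =>
          if p c then
            ks.foldl (fun b k => b.modify k [] (fun xs => xs ++ [val k c])) b
          else b) b).keys = ks ∧
    ∀ k', (cs.foldl
        (fun b c =>
          if p c then
            ks.foldl (fun b k => b.modify k [] (fun xs => xs ++ [val k c])) b
          else b) b).getD k' [] =
      b.getD k' [] ++ (if k' ∈ ks then (cs.filter (fun c => decide (p c))).map (fun c => val k' c) else []) := by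
  induction cs generalizing b with
  | nil => simp [hk]
  | cons c cs ih =>
      simp only [List.foldl_cons]
      by_cases hp : p c
      · have hk' : (ks.foldl (fun b k => b.modify k [] (fun xs => xs ++ [val k c])) b).keys = ks := by
          rw [PySem.Dict.keys_foldl_modify, hk]
          exact set_update_of_subset ks ks (fun x hx => hx)
        obtain ⟨h1, h2⟩ := ih _ hk'
        refine ⟨by simpa [hp] using h1, fun k' => ?_⟩
        rw [if_pos hp, h2 k', inner_loop_getD (fun k => val k c) ks b k' hnd]
        by_cases hm : k' ∈ ks <;> simp [hm, hp]
      · obtain ⟨h1, h2⟩ := ih _ hk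
        refine ⟨by simpa [hp] using h1, fun k' => ?_⟩
        rw [if_neg hp, h2 k']
        by_cases hm : k' ∈ ks <;> simp [hm, hp]

-- ===== VERDICT (by name: the statement is the Claim_ definition above) =====
theorem data_parser_left_spec : Claim_equal_data_parser_left := by
  intro data f t _hdom hpre
  obtain ⟨hnd, -, -, -, -⟩ := hpre
  unfold Spec_data_parser_left data_parser_left data_parser_left_alt
  simp only []
  set d := PySem.Dict.mk data with hd
  have hkeys : d.keys = data.map (·.1) := by simp [hd, PySem.Dict.keys]
  have hitems : d.items = data := rfl
  have hknd : d.keys.Nodup := by rw [hkeys]; exact hnd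
  -- book₀
  set book0 : PySem.Dict String (List Int) :=
    d.keys.foldl (fun b key => b.insert key ([] : List Int)) PySem.Dict.empty with hbook0
  have hb0keys : book0.keys = d.keys := by
    rw [hbook0, PySem.Dict.keys_foldl_insert, PySem.Dict.keys_empty]
    have : PySem.Set.update ([] : List String) d.keys = PySem.Set.ofList d.keys := by
      simp [PySem.Set.update, PySem.Set.ofList_eq_foldl]
    rw [this]
    exact PySem.Set.ofList_eq_self_of_nodup _ hknd
  have hb0getD : ∀ k', book0.getD k' [] = [] := by
    intro k'
    exact getD_foldl_insert_nil _ _ (fun k'' => by simp [PySem.Dict.getD_empty]) k'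
  -- run the outer loop
  obtain ⟨hkeysF, hgetDF⟩ :=
    outer_loop (fun c => PySem.List.pyGetD (d.getD f []) c 0 ≤ t)
      (fun k c => PySem.List.pyGetD (d.getD k []) c 0) d.keys hknd
      (PySem.List.pyRange 0 ((d.getD "class" []).length : Int) 1) book0 hb0keys
  set bookF := (PySem.List.pyRange 0 ((d.getD "class" []).length : Int) 1).foldl
      (fun b count =>
        if PySem.List.pyGetD (d.getD f []) count 0 ≤ t then
          d.keys.foldl
            (fun b feature =>
              b.modify feature [] (fun xs => xs ++ [PySem.List.pyGetD (d.getD feature []) count 0]))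
            b
        else b) book0 with hbookF
  have hFnd : bookF.keys.Nodup := by rw [hkeysF]; exact hknd
  rw [PySem.Dict.items_eq_map_keys bookF hFnd []]
  rw [hkeysF, hkeys, List.map_map]
  refine List.map_congr_left (fun p hp => ?_)
  have hmem : p.1 ∈ d.keys := by rw [hkeys]; exact List.mem_map_of_mem hp
  have hcol : d.getD p.1 [] = p.2 := by
    have hp' : (p.1, p.2) ∈ d.items := by simpa using hp
    exact PySem.Dict.getD_of_mem_items d hp' hknd []
  simp only [Function.comp]
  rw [hgetDF p.1, hb0getD p.1, if_pos hmem, hcol]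
  simp
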